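-- pv_equiv track=rewrite | github.com/Mitarushi/SuperCon_2020 | check_simple_cost.py | simple_cost
-- ===== SOURCE A (Python) =====
-- def simple_cost(s):
--     s = list(s)
--     cost = 0
--     for ind, i in enumerate(s):
--         cost += (26 - (ord(i) - ord("a"))) * ind
--     s.sort()
--     for ind, i in enumerate(s):
--         cost -= (26 - (ord(i) - ord("a"))) * ind
--     return cost
-- ===== SOURCE B (Python) =====
-- def simple_cost(s):
--     # Counting sort over the ASCII alphabet: one pass builds per-character
--     # counts and the weighted sum of the original order; a second pass over
--     # the 128 ASCII codes (in increasing order = sorted order) subtracts each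
--     # bucket's contribution in closed form.  O(n + 128), no comparison sort.
--     counts = {}
--     total = 0
--     for ind, ch in enumerate(s):
--         counts[ch] = counts.get(ch, 0) + 1
--         total += (123 - ord(ch)) * ind
--     ind = 0
--     for code in range(128):
--         k = counts.get(chr(code), 0)
--         total -= (123 - code) * (k * ind + k * (k - 1) // 2)
--         ind += k
--     return total
-- ===== Notes on version B (the rewrite author's own statement) =====
-- stated objective: faster
-- what changed: B replaces A's list(s) + sort + second enumerate pass by a single pass that builds per-character counts alongside the weighted sum, then walks the 128 ASCII codes in increasing order adding each bucket's contribution in closed form (w*(k*i + k*(k-1)/2)), so no comparison sort is performed.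
import Mathlib
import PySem

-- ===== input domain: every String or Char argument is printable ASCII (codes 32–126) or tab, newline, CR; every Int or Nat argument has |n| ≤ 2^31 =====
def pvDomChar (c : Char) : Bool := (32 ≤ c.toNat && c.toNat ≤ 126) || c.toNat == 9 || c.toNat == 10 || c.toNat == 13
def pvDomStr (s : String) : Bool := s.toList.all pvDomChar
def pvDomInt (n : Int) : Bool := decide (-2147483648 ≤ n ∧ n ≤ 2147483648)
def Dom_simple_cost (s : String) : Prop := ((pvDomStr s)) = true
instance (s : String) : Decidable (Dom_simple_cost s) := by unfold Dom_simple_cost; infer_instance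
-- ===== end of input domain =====

-- B replaces A's comparison sort of the string by a single counting pass over the fixed
-- 128-code ASCII alphabet with a closed-form contribution per bucket (objective: faster).


-- ===== PORT A =====
def simple_cost (s : String) : Int :=
  let l := s.toList
  let cost : Int :=
    (PySem.List.enumerate l).foldl
      (fun acc p => acc + (26 - ((p.2.toNat : Int) - 97)) * p.1) 0
  let l2 := PySem.List.sorted l (fun c => c) false
  (PySem.List.enumerate l2).foldl
    (fun acc p => acc - (26 - ((p.2.toNat : Int) - 97)) * p.1) cost

-- ===== PORT B =====
-- one pass builds counts (counts[ch] = counts.get(ch,0)+1) together with the weighted sum;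
-- chr(code) for code in range(128) is exact as Char.ofNat code.toNat (0 ≤ code < 128);
-- k*(k-1)//2 is PySem.Int.floordiv (k*(k-1)) 2
def simple_cost_alt (s : String) : Int :=
  let l := s.toList
  let st :=
    (PySem.List.enumerate l).foldl
      (fun (st : PySem.Dict Char Int × Int) p =>
        (st.1.insert p.2 (st.1.getD p.2 0 + 1),
         st.2 + (123 - (p.2.toNat : Int)) * p.1))
      (PySem.Dict.empty, 0)
  let fin :=
    (PySem.List.pyRange 0 128 1).foldl
      (fun (q : Int × Int) code =>
        let k := st.1.getD (Char.ofNat code.toNat) 0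
        (q.1 + k, q.2 - (123 - code) * (k * q.1 + PySem.Int.floordiv (k * (k - 1)) 2)))
      (0, st.2)
  fin.2

-- ===== PRECONDITION & SPEC =====
def Spec_simple_cost (s : String) (out : Int) : Prop := out = simple_cost_alt s
instance (s : String) (out : Int) : Decidable (Spec_simple_cost s out) := by unfold Spec_simple_cost; infer_instance

-- ===== CLAIM (what is proved, stated in full; the proofs are below) =====
def Claim_equal_simple_cost : Prop := ∀ (s : String), Dom_simple_cost s → Spec_simple_cost s (simple_cost s)

-- ===== LEMMAS AND PROOFS =====

-- weight of a character: 26 - (ord(c) - ord('a')) = 123 - ord(c)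
def pvW (c : Char) : Int := 123 - (c.toNat : Int)

-- weighted positional sum starting at index i
def pvS (i : Int) : List Char → Int
  | [] => 0
  | c :: cs => pvW c * i + pvS (i + 1) cs

theorem pvCharOfNat_toNat (n : Nat) (h : n < 128) : (Char.ofNat n).toNat = n := by
  unfold Char.ofNat
  split
  · rfl
  · next hn => exact absurd (by unfold Nat.isValidChar; omega) hn

theorem pvS_append (xs ys : List Char) (i : Int) :
    pvS i (xs ++ ys) = pvS i xs + pvS (i + (xs.length : Int)) ys := by
  induction xs generalizing i with
  | nil => simp [pvS]
  | cons c cs ih =>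
      simp only [List.cons_append, pvS, ih (i + 1), List.length_cons]
      push_cast; ring_nf

theorem pvS_replicate (k : Nat) (c : Char) (i : Int) :
    pvS i (List.replicate k c) = pvW c * ((k : Int) * i + ((k * (k - 1) / 2 : Nat) : Int)) := by
  induction k generalizing i with
  | zero => simp [pvS]
  | succ n ih =>
      have h2 : ((n + 1) * ((n + 1) - 1) / 2 : Nat) = n + n * (n - 1) / 2 := by
        rcases n with _ | m
        · simp
        · have e : (m + 1 + 1) * (m + 1) = (m + 1) * m + 2 * (m + 1) := by ring
          simp only [Nat.add_sub_cancel] at *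
          omega
      simp only [List.replicate_succ, pvS, ih (i + 1), h2]
      push_cast; ring_nf

theorem pvFloordiv_tri (k : Nat) :
    PySem.Int.floordiv ((k : Int) * ((k : Int) - 1)) 2 = ((k * (k - 1) / 2 : Nat) : Int) := by
  rcases k with _ | n
  · simp [PySem.Int.floordiv]
  · have h : ((n + 1 : Nat) : Int) * (((n + 1 : Nat) : Int) - 1) = (((n + 1) * n : Nat) : Int) := by
      push_cast; ring
    rw [h, PySem.Int.floordiv_eq_ediv_of_pos (by norm_num), Nat.add_sub_cancel]
    generalize (n + 1) * n = m
    omega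

-- A's two enumerate folds compute  acc ± pvS i xs
theorem pvFoldAdd (xs : List Char) (i acc : Int) :
    (PySem.List.enumerate xs i).foldl
        (fun a p => a + (26 - ((p.2.toNat : Int) - 97)) * p.1) acc = acc + pvS i xs := by
  induction xs generalizing i acc with
  | nil => simp [PySem.List.enumerate_nil, pvS]
  | cons c cs ih =>
      simp only [PySem.List.enumerate_cons, List.foldl_cons, pvS, ih]
      simp [pvW]; ring

theorem pvFoldSub (xs : List Char) (i acc : Int) :
    (PySem.List.enumerate xs i).foldl
        (fun a p => a - (26 - ((p.2.toNat : Int) - 97)) * p.1) acc = acc - pvS i xs := by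
  induction xs generalizing i acc with
  | nil => simp [PySem.List.enumerate_nil, pvS]
  | cons c cs ih =>
      simp only [PySem.List.enumerate_cons, List.foldl_cons, pvS, ih]
      simp [pvW]; ring

-- B's first fold splits into a counter fold and pvS
theorem pvFoldPair (xs : List Char) (i : Int) (d : PySem.Dict Char Int) (t : Int) :
    (PySem.List.enumerate xs i).foldl
        (fun (st : PySem.Dict Char Int × Int) p =>
          (st.1.insert p.2 (st.1.getD p.2 0 + 1),
           st.2 + (123 - (p.2.toNat : Int)) * p.1)) (d, t)
      = (xs.foldl (fun d c => d.insert c (d.getD c 0 + 1)) d, t + pvS i xs) := by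
  induction xs generalizing i d t with
  | nil => simp [PySem.List.enumerate_nil, pvS]
  | cons c cs ih =>
      simp only [PySem.List.enumerate_cons, List.foldl_cons, pvS, ih, Prod.mk.injEq]
      refine ⟨trivial, ?_⟩
      unfold pvW; ring

-- the bucket list: for each code in cs, its characters, in that order
def pvL (cnt : Char → Nat) (cs : List Int) : List Char :=
  cs.flatMap (fun code => List.replicate (cnt (Char.ofNat code.toNat)) (Char.ofNat code.toNat))

-- B's second fold computes  t - pvS i (pvL cnt cs)
theorem pvFold2 (cnt : Char → Nat) (cs : List Int)
    (hb : ∀ c ∈ cs, 0 ≤ c ∧ c < 128) (i t : Int) :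
    cs.foldl
        (fun (q : Int × Int) code =>
          (q.1 + (cnt (Char.ofNat code.toNat) : Int),
           q.2 - (123 - code) * ((cnt (Char.ofNat code.toNat) : Int) * q.1
             + PySem.Int.floordiv ((cnt (Char.ofNat code.toNat) : Int)
                 * ((cnt (Char.ofNat code.toNat) : Int) - 1)) 2)))
        (i, t)
      = (i + ((pvL cnt cs).length : Int), t - pvS i (pvL cnt cs)) := by
  induction cs generalizing i t with
  | nil => simp [pvL, pvS]
  | cons code cs ih =>
      have h0 : (0 : Int) ≤ code := (hb code (by simp)).1
      have h1 : code < 128 := (hb code (by simp)).2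
      have hb' : ∀ c ∈ cs, 0 ≤ c ∧ c < 128 := fun c hc => hb c (List.mem_cons_of_mem _ hc)
      have hw : pvW (Char.ofNat code.toNat) = 123 - code := by
        unfold pvW
        rw [pvCharOfNat_toNat code.toNat (by omega), Int.toNat_of_nonneg h0]
      simp only [List.foldl_cons, pvL, List.flatMap_cons]
      rw [ih hb', pvS_append, pvS_replicate, pvFloordiv_tri, hw, Prod.mk.injEq]
      simp only [List.length_append, List.length_replicate]
      constructor
      · simp only [pvL]; push_cast; ring
      · simp only [pvL]; ring

-- distinct codes: counting each bucket once reproduces the counts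
theorem pvL_count (cnt : Char → Nat) (cs : List Int) (hnd : cs.Nodup)
    (hb : ∀ c ∈ cs, 0 ≤ c ∧ c < 128) (ch : Char) :
    (pvL cnt cs).count ch = if ((ch.toNat : Int)) ∈ cs then cnt ch else 0 := by
  induction cs with
  | nil => simp [pvL]
  | cons code cs ih =>
      have h0 := (hb code (by simp)).1
      have h1 := (hb code (by simp)).2
      have hlt : code.toNat < 128 := by omega
      have hb' : ∀ c ∈ cs, 0 ≤ c ∧ c < 128 := fun c hc => hb c (List.mem_cons_of_mem _ hc)
      have hnd' := (List.nodup_cons.mp hnd).2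
      have hnin := (List.nodup_cons.mp hnd).1
      simp only [pvL, List.flatMap_cons, List.count_append] at *
      rw [ih hnd' hb', List.count_replicate]
      by_cases hc : ((ch.toNat : Int)) = code
      · have hceq : Char.ofNat code.toNat = ch := by
          have he : code.toNat = ch.toNat := by omega
          rw [he]; exact Char.ofNat_toNat ch
        rw [hceq]
        simp only [beq_self_eq_true, if_true]
        rw [hc]
        simp [hnin]
      · have hne : (Char.ofNat code.toNat == ch) = false := by
          apply beq_eq_false_iff_ne.mpr
          intro he
          apply hc
          have : (Char.ofNat code.toNat).toNat = code.toNat := pvCharOfNat_toNat _ hlt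
          rw [he] at this
          omega
        rw [hne]
        simp only [List.mem_cons]
        have : ¬ ((ch.toNat : Int) = code) := hc
        simp [this]

-- the bucket list is weakly increasing
theorem pvL_pairwise (cnt : Char → Nat) (cs : List Int)
    (hp : cs.Pairwise (· < ·)) (hb : ∀ c ∈ cs, 0 ≤ c ∧ c < 128) :
    (pvL cnt cs).Pairwise (fun a b => a ≤ b) := by
  induction cs with
  | nil => simp [pvL]
  | cons code cs ih =>
      have h0 := (hb code (by simp)).1
      have h1 := (hb code (by simp)).2
      have hb' : ∀ c ∈ cs, 0 ≤ c ∧ c < 128 := fun c hc => hb c (List.mem_cons_of_mem _ hc)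
      have hlt := (List.pairwise_cons.mp hp).1
      have hp' := (List.pairwise_cons.mp hp).2
      simp only [pvL, List.flatMap_cons]
      apply List.pairwise_append.mpr
      refine ⟨List.pairwise_replicate.mpr (Or.inr (le_refl _)), ih hp' hb', ?_⟩
      intro x hx y hy
      have hxe : x = Char.ofNat code.toNat := (List.eq_of_mem_replicate hx)
      obtain ⟨code', hc', hy'⟩ := List.mem_flatMap.mp hy
      have hye : y = Char.ofNat code'.toNat := List.eq_of_mem_replicate hy'
      have hcc : code < code' := hlt code' hc'
      have hb2 := hb' code' hc'
      have hxn : x.toNat = code.toNat := by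
        rw [hxe]; exact pvCharOfNat_toNat _ (by omega)
      have hyn : y.toNat = code'.toNat := by
        rw [hye]; exact pvCharOfNat_toNat _ (by omega)
      have hb2' := hb2.1
      exact Char.le_def.mpr (show x.toNat ≤ y.toNat by omega)

-- ===== VERDICT (by name: the statement is the Claim_ definition above) =====
theorem simple_cost_spec : Claim_equal_simple_cost := by
  intro s hdom
  unfold Spec_simple_cost
  have hchars : ∀ c ∈ s.toList, c.toNat < 128 := by
    intro c hc
    have h := List.all_eq_true.mp hdom c hc
    simp only [pvDomChar, Bool.or_eq_true, Bool.and_eq_true, decide_eq_true_eq,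
      beq_iff_eq] at h
    omega
  have hb : ∀ c ∈ PySem.List.pyRange 0 128 1, 0 ≤ c ∧ c < 128 := by
    intro c hc
    exact PySem.List.mem_pyRange_one.mp hc
  have hnd : (PySem.List.pyRange 0 128 1).Nodup := PySem.List.nodup_pyRange_one 0 128
  have hpw : (PySem.List.pyRange 0 128 1).Pairwise (· < ·) :=
    PySem.List.pairwise_lt_pyRange_one 0 128
  have hsorted : PySem.List.sorted s.toList (fun c => c) false
      = pvL (fun c => s.toList.count c) (PySem.List.pyRange 0 128 1) := by
    apply PySem.List.sorted_id_eq_of_perm_of_pairwise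
    · apply List.perm_iff_count.mpr
      intro ch
      rw [pvL_count _ _ hnd hb ch]
      by_cases h : ch.toNat < 128
      · have hm : ((ch.toNat : Int)) ∈ PySem.List.pyRange 0 128 1 :=
          PySem.List.mem_pyRange_one.mpr ⟨by omega, by exact_mod_cast h⟩
        simp [hm]
      · have hm : ¬ ((ch.toNat : Int)) ∈ PySem.List.pyRange 0 128 1 := by
          rw [PySem.List.mem_pyRange_one]; omega
        simp only [hm, if_false]
        exact (List.count_eq_zero.mpr (fun hc => h (hchars ch hc))).symm
    · exact pvL_pairwise _ _ hpw hb
  have hcnt : ∀ ch, (s.toList.foldl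
      (fun d c => d.insert c (d.getD c 0 + 1)) PySem.Dict.empty).getD ch 0
      = ((s.toList.count ch : Nat) : Int) := by
    intro ch
    rw [PySem.Dict.getD_foldl_insert_add_one]
    simp [PySem.Dict.getD_empty]
  simp only [simple_cost, simple_cost_alt]
  rw [pvFoldAdd, pvFoldSub, pvFoldPair]
  have hfun : (fun (q : Int × Int) code =>
        let k := ((s.toList.foldl (fun d c => d.insert c (d.getD c 0 + 1))
          PySem.Dict.empty, (0 : Int) + pvS 0 s.toList).1).getD (Char.ofNat code.toNat) 0
        (q.1 + k, q.2 - (123 - code) * (k * q.1 + PySem.Int.floordiv (k * (k - 1)) 2)))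
      = (fun (q : Int × Int) code =>
        (q.1 + ((s.toList.count (Char.ofNat code.toNat) : Nat) : Int),
         q.2 - (123 - code) * (((s.toList.count (Char.ofNat code.toNat) : Nat) : Int) * q.1
           + PySem.Int.floordiv (((s.toList.count (Char.ofNat code.toNat) : Nat) : Int)
               * (((s.toList.count (Char.ofNat code.toNat) : Nat) : Int) - 1)) 2))) := by
    funext q code
    simp only [hcnt]
  rw [hfun, pvFold2 (fun c => s.toList.count c) _ hb]
  rw [hsorted]
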